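-- pv_equiv track=rewrite | github.com/Fondamenti18/fondamenti-di-programmazione | students/1799754/homework04/program01.py | livelli
-- ===== SOURCE A (Python) =====
-- def livelli(a,d,i,c):
--     l=[]
--     if len(i)==0:
--         return d
--     else:
--         d[c]=[]
--         for x in i:
--             d[c].append(x)
--             l+=a[x]
--         d[c].sort()
--         livelli(a,d,l,c+1)
--     return d
-- ===== SOURCE B (Python) =====
-- def livelli(a, d, i, c):
--     # Stage 1: collect the per-level sorted frontiers as a plain list.
--     levels = []
--     while i:
--         levels.append(sorted(i))
--         i = [y for x in i for y in a[x]]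
--     # Stage 2: write them into d under consecutive keys.
--     for lev in levels:
--         d[c] = lev
--         c += 1
--     return d
-- ===== Notes on version B (the rewrite author's own statement) =====
-- stated objective: alternative
-- what changed: The level recursion becomes two staged passes: a loop that first collects every sorted frontier into a plain list of levels (building each next frontier with one flattening comprehension), then a second loop that writes the collected levels into d under consecutive keys, instead of mutating d inside an append-and-extend recursion with an in-place sort per call.
import Mathlib
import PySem

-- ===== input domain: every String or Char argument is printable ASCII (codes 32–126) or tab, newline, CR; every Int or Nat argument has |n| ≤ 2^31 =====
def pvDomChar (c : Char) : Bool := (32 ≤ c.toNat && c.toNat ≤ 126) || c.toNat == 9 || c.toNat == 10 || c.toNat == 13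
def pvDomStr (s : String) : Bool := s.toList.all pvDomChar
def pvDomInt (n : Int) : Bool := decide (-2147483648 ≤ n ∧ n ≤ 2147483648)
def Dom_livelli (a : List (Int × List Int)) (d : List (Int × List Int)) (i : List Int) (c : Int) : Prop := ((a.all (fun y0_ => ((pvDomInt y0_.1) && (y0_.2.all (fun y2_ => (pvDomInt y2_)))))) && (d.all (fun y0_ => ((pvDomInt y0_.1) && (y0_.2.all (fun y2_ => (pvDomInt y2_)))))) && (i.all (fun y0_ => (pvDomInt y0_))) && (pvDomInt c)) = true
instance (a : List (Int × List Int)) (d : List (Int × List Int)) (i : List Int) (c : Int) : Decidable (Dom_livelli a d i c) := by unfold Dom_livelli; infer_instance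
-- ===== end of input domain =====

-- B replaces A's recursion-with-in-place-mutation by two staged passes: first collect the
-- sorted frontier of every level into a plain list, then write those levels into d under
-- consecutive keys (alternative decomposition, same cost); Python A mutates d in place,
-- the theorems are about the returned value.

-- ===== PORT A =====
-- recursion depth is bounded by a.length + 1 levels on every input admitted by Pre_livelli
-- (acyclic, key-closed), so the fuel never runs out there; the fuel only makes the port total.
def livelliGoA (a : PySem.Dict Int (List Int)) : Nat → PySem.Dict Int (List Int) → List Int → Int → PySem.Dict Int (List Int)
  | 0, d, _, _ => d
  | fuel + 1, d, i, c =>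
    if i.length = 0 then d
    else
      -- d[c] = []; for x in i: d[c].append(x); l += a[x]
      let st := i.foldl
        (fun (s : PySem.Dict Int (List Int) × List Int) x =>
          (s.1.insert c (s.1.getD c [] ++ [x]), s.2 ++ a.getD x []))
        (d.insert c [], ([] : List Int))
      -- d[c].sort()
      let d2 := st.1.insert c (PySem.List.sorted (st.1.getD c []) (fun v => v) false)
      livelliGoA a fuel d2 st.2 (c + 1)

def livelli (a : List (Int × List Int)) (d : List (Int × List Int)) (i : List Int) (c : Int) : List (Int × List Int) :=
  (livelliGoA (PySem.Dict.mk a) (a.length + 1) (PySem.Dict.mk d) i c).items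

-- ===== PORT B =====
-- stage 1 of Source B: the while loop collecting sorted(i) per level into `levels`
def livelliLevels (a : PySem.Dict Int (List Int)) : Nat → List Int → List (List Int)
  | 0, _ => []
  | fuel + 1, i =>
    if i = [] then []
    else PySem.List.sorted i (fun v => v) false ::
         livelliLevels a fuel (i.flatMap (fun x => a.getD x []))

-- stage 2 of Source B: `for lev in levels: d[c] = lev; c += 1`
def livelli_alt (a : List (Int × List Int)) (d : List (Int × List Int)) (i : List Int) (c : Int) : List (Int × List Int) :=
  ((livelliLevels (PySem.Dict.mk a) (a.length + 1) i).foldl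
      (fun (s : PySem.Dict Int (List Int) × Int) lev => (s.1.insert s.2 lev, s.2 + 1))
      (PySem.Dict.mk d, c)).1.items

-- ===== PRECONDITION & SPEC =====
def pvNbrs (a : List (Int × List Int)) (x : Int) : List Int := (PySem.Dict.mk a).getD x []
def pvReach (a : List (Int × List Int)) : Nat → List Int → List Int
  | 0, s => s
  | n + 1, s => pvReach a n (PySem.Set.update s (s.flatMap (pvNbrs a)))
-- Pre_ excludes exactly the inputs on which Python's A raises: a node reachable from the start
-- frontier i that is missing from the adjacency keys (KeyError) or lies on a directed cycle
-- (unbounded recursion, RecursionError).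
def Pre_livelli (a : List (Int × List Int)) (d : List (Int × List Int)) (i : List Int) (c : Int) : Prop :=
  (∀ x ∈ pvReach a (a.length + (a.flatMap (fun p => p.2)).length) i, x ∈ a.map Prod.fst) ∧
  (∀ x ∈ pvReach a (a.length + (a.flatMap (fun p => p.2)).length) i,
     x ∉ pvReach a (a.length + (a.flatMap (fun p => p.2)).length) (pvNbrs a x))
instance (a : List (Int × List Int)) (d : List (Int × List Int)) (i : List Int) (c : Int) : Decidable (Pre_livelli a d i c) := by unfold Pre_livelli; infer_instance

def pvWitness_livelli : (List (Int × List Int)) × (List (Int × List Int)) × List Int × Int :=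
  ([(0, [1, 2]), (1, [2]), (2, [])], [(9, [5])], [0, 2], 0)

def Spec_livelli (a : List (Int × List Int)) (d : List (Int × List Int)) (i : List Int) (c : Int) (out : List (Int × List Int)) : Prop := out = livelli_alt a d i c
instance (a : List (Int × List Int)) (d : List (Int × List Int)) (i : List Int) (c : Int) (out : List (Int × List Int)) : Decidable (Spec_livelli a d i c out) := by unfold Spec_livelli; infer_instance

-- ===== CLAIM (what is proved, stated in full; the proofs are below) =====
def Claim_equal_livelli : Prop := ∀ (a : List (Int × List Int)) (d : List (Int × List Int)) (i : List Int) (c : Int), Dom_livelli a d i c → Pre_livelli a d i c → Spec_livelli a d i c (livelli a d i c)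

-- ===== LEMMAS AND PROOFS =====

-- a pair-state foldl whose components do not interact splits into two foldls
theorem pv_foldl_pair {α β γ : Type} (f : α → γ → α) (g : β → γ → β) :
    ∀ (l : List γ) (p : α) (q : β),
      l.foldl (fun s x => (f s.1 x, g s.2 x)) (p, q) = (l.foldl f p, l.foldl g q) := by
  intro l
  induction l with
  | nil => intro p q; rfl
  | cons x xs ih => intro p q; simpa using ih (f p x) (g q x)

-- the append-to-d[c] loop just extends the entry at c
theorem pv_foldl_append_key (c : Int) :
    ∀ (i : List Int) (d0 : PySem.Dict Int (List Int)) (acc : List Int),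
      i.foldl (fun dd x => dd.insert c (dd.getD c [] ++ [x])) (d0.insert c acc)
        = d0.insert c (acc ++ i) := by
  intro i
  induction i with
  | nil => intro d0 acc; simp
  | cons x xs ih =>
      intro d0 acc
      simp only [List.foldl_cons, PySem.Dict.getD_insert_self, PySem.Dict.insert_insert_self]
      simpa using ih d0 (acc ++ [x])

theorem pv_go_eq (a : PySem.Dict Int (List Int)) :
    ∀ (fuel : Nat) (d : PySem.Dict Int (List Int)) (i : List Int) (c : Int),
      livelliGoA a fuel d i c
        = ((livelliLevels a fuel i).foldl
            (fun (s : PySem.Dict Int (List Int) × Int) lev => (s.1.insert s.2 lev, s.2 + 1))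
            (d, c)).1 := by
  intro fuel
  induction fuel with
  | zero => intro d i c; rfl
  | succ n ih =>
      intro d i c
      simp only [livelliGoA, livelliLevels, List.length_eq_zero_iff]
      by_cases h : i = []
      · simp [h]
      · simp only [h, if_false, List.foldl_cons]
        rw [pv_foldl_pair (fun dd x => dd.insert c (dd.getD c [] ++ [x]))
              (fun l x => l ++ a.getD x []) i (d.insert c []) []]
        rw [show (i.foldl (fun dd x => dd.insert c (dd.getD c [] ++ [x])) (d.insert c []))
              = d.insert c i from by simpa using pv_foldl_append_key c i d []]
        rw [PySem.List.foldl_append_eq_flatMap]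
        simp only [PySem.Dict.getD_insert_self, PySem.Dict.insert_insert_self, List.nil_append]
        exact ih _ _ _

-- ===== VERDICT (by name: the statement is the Claim_ definition above) =====
theorem livelli_spec : Claim_equal_livelli := by
  intro a d i c _ _
  unfold Spec_livelli livelli livelli_alt
  rw [pv_go_eq]
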